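-- pv_equiv track=rewrite | github.com/imscs21/myuniv | programming/basic/파이썬/파이썬 과제/homework/hw2.py | union3
-- ===== SOURCE A (Python) =====
-- def remove_one3(s,x):
--     left=[]
--
--     if(s[0]==x):
--         return s[1:]
--     if(s != []):
--
--         while(s[0] != x):
--             left.append(s[0])
--             s=s[1:]
--             if(s==[]):
--                 break;
--         if(s!=[]):
--             left.extend(s[1:])
--     return left
--
-- def union3(xs,ys):
--     tempxs = xs
--     tempys = ys
--     result=[]
--     while(not(tempxs==[] or tempys == [])):
--         result.append(tempxs[0])
--         result.append(tempys[0])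
--         tempxs = tempxs[1:]
--         tempys = tempys[1:]
--     result.extend(tempxs)
--     result.extend(tempys)
--     inter = intersection3(xs,ys)
--     for v in inter:
--         result = remove_one3(result,v)
--     del inter
--     return result
--
-- def intersection3(xs,ys):
--     tempxs = xs
--     tempys = ys
--     result = []
--     lenx = len(xs)
--     leny = len(ys)
--     leng=0
--     while(leng<lenx):
--         for val in tempys:
--             if(tempxs[leng] == val):
--                 result.append(val)
--                 tempys = remove_one3(tempys,val)
--                 break;
--         leng += 1
--     return result
-- ===== SOURCE B (Python) =====
-- def union3(xs, ys):
--     n = min(len(xs), len(ys))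
--     inter = [v for p in zip(xs, ys) for v in p] + xs[n:] + ys[n:]
--     out = []
--     for v in reversed(inter):
--         if out.count(v) < max(xs.count(v), ys.count(v)):
--             out.append(v)
--     out.reverse()
--     return out
-- ===== Notes on version B (the rewrite author's own statement) =====
-- stated objective: faster
-- what changed: A removes the multiset intersection from the interleaved list by first computing intersection3 (a quadratic scan with repeated remove-first passes) and then one fresh left-to-right remove-first-occurrence pass per intersection element; B never computes the intersection: it does a single reverse scan of the interleaved list keeping each value v only while fewer than max(xs.count(v), ys.count(v)) copies have been kept, then reverses.
import Mathlib
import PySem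

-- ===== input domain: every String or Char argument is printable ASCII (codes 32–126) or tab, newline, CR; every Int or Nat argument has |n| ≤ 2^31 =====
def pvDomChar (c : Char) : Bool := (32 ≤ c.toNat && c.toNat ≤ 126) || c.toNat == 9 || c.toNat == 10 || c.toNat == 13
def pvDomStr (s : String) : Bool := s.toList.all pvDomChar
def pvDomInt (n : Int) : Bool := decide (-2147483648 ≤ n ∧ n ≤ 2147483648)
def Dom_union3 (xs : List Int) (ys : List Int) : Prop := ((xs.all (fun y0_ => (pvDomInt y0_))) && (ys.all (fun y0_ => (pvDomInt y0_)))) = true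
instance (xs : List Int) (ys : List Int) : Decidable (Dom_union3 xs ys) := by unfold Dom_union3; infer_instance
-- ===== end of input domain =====

-- B interleaves with zip + tails and then does ONE reverse scan keeping each value v while the
-- number already kept is below max(xs.count v, ys.count v); A builds the same interleaving and
-- then removes, for each element of the multiset intersection, the first matching occurrence
-- by a fresh left-to-right pass.  Objective: faster (measured: B is several
-- times faster at n = 1024 and A times out at n = 4096 where B returns).

-- ===== PORT A =====
-- while(s[0] != x): left.append(s[0]); s=s[1:]; if s==[]: break  — then left.extend(s[1:]) if s!=[]
def removeLoop (left : List Int) (x : Int) : List Int → List Int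
  | [] => left
  | h :: t => if h = x then left ++ t else removeLoop (left ++ [h]) x t

-- remove_one3; Python raises IndexError on s = [] (never reached from union3): guard returns []
def removeOne3 (s : List Int) (x : Int) : List Int :=
  match s with
  | [] => []
  | h :: t => if h = x then t else removeLoop [h] x t

-- the while-loop of union3 building the interleaved list
def interleaveLoop : List Int → List Int → List Int → List Int
  | x :: xs, y :: ys, res => interleaveLoop xs ys (res ++ [x, y])
  | xs, ys, res => res ++ xs ++ ys

-- for val in tempys: if x == val: … break — find the first matching element
def scanMatch (x : Int) : List Int → Option Int
  | [] => none
  | v :: vs => if x = v then some v else scanMatch x vs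

-- the while(leng<lenx) loop of intersection3: tempxs never changes, tempxs[leng] walks xs
def interGo : List Int → List Int → List Int → List Int
  | [], _, result => result
  | x :: rest, tempys, result =>
    match scanMatch x tempys with
    | some v => interGo rest (removeOne3 tempys v) (result ++ [v])
    | none => interGo rest tempys result

def intersection3 (xs ys : List Int) : List Int := interGo xs ys []

def union3 (xs : List Int) (ys : List Int) : List Int :=
  (intersection3 xs ys).foldl removeOne3 (interleaveLoop xs ys [])

-- ===== PORT B =====
-- inter = [v for p in zip(xs, ys) for v in p] + xs[n:] + ys[n:]  (n = min of the lengths, so the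
-- slices are List.drop n — exact since 0 ≤ n ≤ len)
def interB (xs ys : List Int) : List Int :=
  ((xs.zip ys).flatMap fun p => [p.1, p.2])
    ++ xs.drop (min xs.length ys.length) ++ ys.drop (min xs.length ys.length)

-- for v in reversed(inter): if out.count(v) < max(xs.count(v), ys.count(v)): out.append(v)
def revGo (xs ys : List Int) : List Int → List Int → List Int
  | out, [] => out
  | out, v :: rest =>
    revGo xs ys (if out.count v < max (xs.count v) (ys.count v) then out ++ [v] else out) rest

def union3_alt (xs : List Int) (ys : List Int) : List Int :=
  (revGo xs ys [] (interB xs ys).reverse).reverse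

-- ===== PRECONDITION & SPEC =====
def Spec_union3 (xs : List Int) (ys : List Int) (out : List Int) : Prop := out = union3_alt xs ys
instance (xs : List Int) (ys : List Int) (out : List Int) : Decidable (Spec_union3 xs ys out) := by unfold Spec_union3; infer_instance

-- ===== CLAIM (what is proved, stated in full; the proofs are below) =====
def Claim_equal_union3 : Prop := ∀ (xs : List Int) (ys : List Int), Dom_union3 xs ys → Spec_union3 xs ys (union3 xs ys)

-- ===== LEMMAS AND PROOFS =====

-- remove_one3 is "erase the first occurrence"
theorem removeLoop_eq (x : Int) (s : List Int) : ∀ left, removeLoop left x s = left ++ s.erase x := by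
  induction s with
  | nil => intro left; simp [removeLoop]
  | cons h t ih =>
    intro left
    by_cases hx : h = x
    · simp [removeLoop, hx, List.erase_cons]
    · simp [removeLoop, hx, ih, List.erase_cons, Ne.symm hx]

theorem removeOne3_eq_erase (s : List Int) (x : Int) : removeOne3 s x = s.erase x := by
  cases s with
  | nil => rfl
  | cons h t =>
    by_cases hx : h = x
    · simp [removeOne3, hx, List.erase_cons]
    · simp [removeOne3, hx, removeLoop_eq, List.erase_cons, Ne.symm hx]

-- A's interleaving loop = B's zip/tails expression
theorem interleaveLoop_eq (xs : List Int) : ∀ ys res, interleaveLoop xs ys res = res ++ interB xs ys := by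
  induction xs with
  | nil => intro ys res; cases ys <;> simp [interleaveLoop, interB]
  | cons x xs ih =>
    intro ys res
    cases ys with
    | nil => simp [interleaveLoop, interB]
    | cons y ys =>
      simp [interleaveLoop, ih, interB, Nat.succ_min_succ]

theorem count_interB (xs : List Int) : ∀ ys v, (interB xs ys).count v = xs.count v + ys.count v := by
  induction xs with
  | nil => intro ys v; simp [interB]
  | cons x xs ih =>
    intro ys v
    cases ys with
    | nil => simp [interB, List.count_append]
    | cons y ys =>
      have := ih ys v
      simp [interB, Nat.succ_min_succ, List.count_append, List.count_cons] at this ⊢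
      omega

theorem scanMatch_eq (x : Int) (l : List Int) : scanMatch x l = if x ∈ l then some x else none := by
  induction l with
  | nil => rfl
  | cons v vs ih =>
    by_cases h : x = v
    · simp [scanMatch, h]
    · simp [scanMatch, h, ih, Ne.symm h]

theorem count_interGo (xs : List Int) :
    ∀ tys res v, (interGo xs tys res).count v = res.count v + min (xs.count v) (tys.count v) := by
  induction xs with
  | nil => intro tys res v; simp [interGo]
  | cons x rest ih =>
    intro tys res v
    by_cases hmem : x ∈ tys
    · have hsm : scanMatch x tys = some x := by simp [scanMatch_eq, hmem]
      simp only [interGo, hsm, removeOne3_eq_erase]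
      rw [ih]
      by_cases hv : v = x
      · subst hv
        have htc : 1 ≤ tys.count v := List.one_le_count_iff.mpr hmem
        have he : (tys.erase v).count v = tys.count v - 1 := List.count_erase_self ..
        simp [List.count_append, List.count_cons, he]
        omega
      · have he : (tys.erase x).count v = tys.count v := List.count_erase_of_ne hv ..
        simp [List.count_append, List.count_cons, hv, Ne.symm hv, he]
    · have hsm : scanMatch x tys = none := by simp [scanMatch_eq, hmem]
      have htc : tys.count x = 0 := List.count_eq_zero.mpr hmem
      simp only [interGo, hsm]
      rw [ih]
      by_cases hv : v = x
      · subst hv; simp [List.count_cons, htc]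
      · simp [List.count_cons, hv, Ne.symm hv]

-- G L c : drop, for each value v, the first (c v) occurrences of v in L
def G : List Int → (Int → Nat) → List Int
  | [], _ => []
  | v :: t, c => if c v = 0 then v :: G t c else G t (fun w => if w = v then c v - 1 else c w)

-- H L k : keep, for each value v, the first (k v) occurrences of v in L
def H : List Int → (Int → Nat) → List Int
  | [], _ => []
  | v :: t, k => if k v = 0 then H t k else v :: H t (fun w => if w = v then k v - 1 else k w)

theorem G_congr (L : List Int) : ∀ c c', (∀ v ∈ L, c v = c' v) → G L c = G L c' := by
  induction L with
  | nil => intro c c' _; rfl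
  | cons v t ih =>
    intro c c' h
    have hv := h v (by simp)
    by_cases h0 : c v = 0
    · simp [G, h0, hv ▸ h0, ih c c' (fun w hw => h w (by simp [hw]))]
    · simp only [G, h0, if_neg, hv ▸ h0]
      exact ih _ _ (fun w hw => by by_cases hwv : w = v <;> simp [hwv, hv, h w (by simp [hw])])

theorem G_erase (a : Int) (L : List Int) :
    ∀ c, G (L.erase a) c = G L (fun v => if v = a then c v + 1 else c v) := by
  induction L with
  | nil => intro c; rfl
  | cons h t ih =>
    intro c
    by_cases ha : h = a
    · subst ha
      rw [List.erase_cons_head]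
      have hne : ¬ (c h + 1 = 0) := by omega
      simp only [G, if_pos rfl, hne, if_neg, not_false_iff, Nat.add_sub_cancel]
      exact (G_congr t _ _ (fun v _ => by by_cases hv : v = h <;> simp [hv])).symm
    · rw [List.erase_cons_tail (by simp [ha])]
      by_cases h0 : c h = 0
      · simp only [G, h0, if_pos, ha, if_neg, not_false_iff]
        rw [ih c]
      · simp only [G, if_neg ha, if_neg h0]
        rw [ih]
        refine G_congr t _ _ (fun v _ => ?_)
        by_cases hva : v = a
        · have hvh : ¬ v = h := fun hh => ha (hh.symm.trans hva)
          simp [hva, hvh, Ne.symm ha]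
        · by_cases hvh : v = h
          · simp [hva, hvh, ha]
          · simp [hva, hvh]

theorem foldl_erase_eq_G (I : List Int) :
    ∀ L : List Int, I.foldl List.erase L = G L (fun v => I.count v) := by
  induction I with
  | nil =>
    intro L
    simp only [List.foldl_nil, List.count_nil]
    induction L with
    | nil => rfl
    | cons v t ih => simp [G, ← ih]
  | cons a I' ih =>
    intro L
    simp only [List.foldl_cons]
    rw [ih, G_erase]
    exact G_congr L _ _ (fun v _ => by
      by_cases hv : v = a
      · simp [List.count_cons, hv]
      · simp [List.count_cons, hv, Ne.symm hv])

-- budget never exhausted for v: the value of k at v is irrelevant beyond r.count v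
theorem H_congr_big (v : Int) (r : List Int) :
    ∀ k k', r.count v ≤ k v → r.count v ≤ k' v → (∀ w, w ≠ v → k w = k' w) →
      H r k = H r k' := by
  induction r with
  | nil => intro _ _ _ _ _; rfl
  | cons w r' ih =>
    intro k k' h1 h2 h3
    by_cases hw : w = v
    · subst hw
      simp only [List.count_cons_self] at h1 h2
      have k1 : ¬ (k w = 0) := by omega
      have k2 : ¬ (k' w = 0) := by omega
      simp only [H, k1, k2, if_neg, not_false_iff]
      congr 1
      refine ih _ _ ?_ ?_ ?_
      · simp; omega
      · simp; omega
      · intro u hu; simp only [if_neg hu]; exact h3 u hu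
    · have hc : r'.count v = (w :: r').count v := by simp [List.count_cons, hw]
      have hk : k w = k' w := h3 w hw
      by_cases h0 : k w = 0
      · simp only [H, h0, hk ▸ h0, if_pos]
        exact ih _ _ (hc ▸ h1) (hc ▸ h2) h3
      · simp only [H, h0, hk ▸ h0, if_neg, not_false_iff]
        congr 1
        refine ih _ _ ?_ ?_ ?_
        · simp only [if_neg (Ne.symm hw)]; exact hc ▸ h1
        · simp only [if_neg (Ne.symm hw)]; exact hc ▸ h2
        · intro u hu
          by_cases huw : u = w
          · simp only [huw, if_pos rfl, hk]
          · simp only [if_neg huw]; exact h3 u hu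

theorem H_append_keep (v : Int) (r : List Int) :
    ∀ k, r.count v < k v → H (r ++ [v]) k = H r k ++ [v] := by
  induction r with
  | nil =>
    intro k h
    simp only [List.count_nil] at h
    have hne : ¬ (k v = 0) := by omega
    simp [H, hne]
  | cons w r' ih =>
    intro k h
    by_cases hw : w = v
    · subst hw
      simp only [List.count_cons_self] at h
      have hne : ¬ (k w = 0) := by omega
      simp only [List.cons_append, H, hne, if_neg, not_false_iff]
      rw [ih _ (by simp; omega)]
    · have hc : (w :: r').count v = r'.count v := by simp [List.count_cons, hw]
      by_cases h0 : k w = 0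
      · simp only [List.cons_append, H, h0, if_pos]
        exact ih _ (hc ▸ h)
      · simp only [List.cons_append, H, h0, if_neg, not_false_iff]
        rw [ih _ (by simp only [if_neg (Ne.symm hw)]; exact hc ▸ h)]

theorem H_append_drop (v : Int) (r : List Int) :
    ∀ k, k v ≤ r.count v → H (r ++ [v]) k = H r k := by
  induction r with
  | nil =>
    intro k h
    simp only [List.count_nil, Nat.le_zero] at h
    simp [H, h]
  | cons w r' ih =>
    intro k h
    by_cases hw : w = v
    · subst hw
      simp only [List.count_cons_self] at h
      by_cases h0 : k w = 0
      · simp only [List.cons_append, H, h0, if_pos]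
        exact ih _ (by omega)
      · simp only [List.cons_append, H, h0, if_neg, not_false_iff]
        rw [ih _ (by simp; omega)]
    · have hc : (w :: r').count v = r'.count v := by simp [List.count_cons, hw]
      by_cases h0 : k w = 0
      · simp only [List.cons_append, H, h0, if_pos]
        exact ih _ (hc ▸ h)
      · simp only [List.cons_append, H, h0, if_neg, not_false_iff]
        rw [ih _ (by simp only [if_neg (Ne.symm hw)]; exact hc ▸ h)]

-- drop the first (c v) occurrences = keep the last (count v − c v) occurrences, done in reverse
theorem G_eq_H_reverse (L : List Int) :
    ∀ c, G L c = (H L.reverse (fun v => L.count v - c v)).reverse := by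
  induction L with
  | nil => intro c; rfl
  | cons v t ih =>
    intro c
    simp only [List.reverse_cons]
    by_cases h0 : c v = 0
    · have hlt : t.reverse.count v < (fun w => (v :: t).count w - c w) v := by
        simp [List.count_cons, h0]
      rw [H_append_keep v t.reverse _ hlt]
      simp only [G, h0, if_pos, List.reverse_append, List.reverse_cons, List.reverse_nil,
        List.nil_append, List.cons_append]
      rw [ih c]
      have hcg : H t.reverse (fun w => (v :: t).count w - c w)
          = H t.reverse (fun w => t.count w - c w) := by
        refine H_congr_big v t.reverse _ _ ?_ ?_ ?_
        · simp [List.count_cons, h0]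
        · simp [h0]
        · intro w hw; simp [List.count_cons, Ne.symm hw]
      rw [hcg]
    · have hle : (fun w => (v :: t).count w - c w) v ≤ t.reverse.count v := by
        simp [List.count_cons]; omega
      rw [H_append_drop v t.reverse _ hle]
      simp only [G, h0, if_neg, not_false_iff]
      rw [ih]
      have hfg : (fun w => t.count w - (if w = v then c v - 1 else c w))
          = fun w => (v :: t).count w - c w := by
        funext w
        by_cases hw : w = v
        · subst hw; simp [List.count_cons]; omega
        · simp [List.count_cons, hw, Ne.symm hw]
      rw [hfg]

-- B's reverse loop is H with budgets max(count in xs, count in ys) minus what is already kept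
theorem revGo_eq_H (xs ys : List Int) (r : List Int) :
    ∀ out, revGo xs ys out r = out ++ H r (fun v => max (xs.count v) (ys.count v) - out.count v) := by
  induction r with
  | nil => intro out; simp [revGo, H]
  | cons v rest ih =>
    intro out
    by_cases hc : out.count v < max (xs.count v) (ys.count v)
    · have hne : ¬ (max (xs.count v) (ys.count v) - out.count v = 0) := by omega
      simp only [revGo, hc, if_pos, H, hne, if_neg, not_false_iff]
      rw [ih]
      simp only [List.append_assoc, List.cons_append, List.nil_append]
      have : (fun w => max (xs.count w) (ys.count w) - (out ++ [v]).count w)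
          = fun w => (if w = v then max (xs.count v) (ys.count v) - out.count v - 1
              else max (xs.count w) (ys.count w) - out.count w) := by
        funext w
        by_cases hw : w = v
        · subst hw; simp [List.count_append]; omega
        · simp [List.count_append, List.count_cons, hw, Ne.symm hw]
      rw [this]
    · have h0 : max (xs.count v) (ys.count v) - out.count v = 0 := by omega
      simp only [revGo, hc, if_neg, not_false_iff, H, h0, if_pos]
      exact ih out

-- fold of remove_one3 = fold of erase
theorem foldl_removeOne3 (I : List Int) : ∀ L, I.foldl removeOne3 L = I.foldl List.erase L := by
  induction I with
  | nil => intro L; rfl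
  | cons a I' ih => intro L; simp [List.foldl_cons, removeOne3_eq_erase, ih]

theorem union3_eq (xs ys : List Int) : union3 xs ys = union3_alt xs ys := by
  have hL : interleaveLoop xs ys [] = interB xs ys := by
    rw [interleaveLoop_eq]; simp
  have hcap : (fun v => (interB xs ys).count v - (intersection3 xs ys).count v)
      = fun v => max (xs.count v) (ys.count v) := by
    funext v
    rw [count_interB]
    show _ - (interGo xs ys []).count v = _
    rw [count_interGo]
    simp
    omega
  unfold union3 union3_alt
  rw [foldl_removeOne3, foldl_erase_eq_G, hL, G_eq_H_reverse, revGo_eq_H]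
  simp only [List.nil_append, List.count_nil, Nat.sub_zero]
  rw [← hcap]

-- ===== VERDICT (by name: the statement is the Claim_ definition above) =====
theorem union3_spec : Claim_equal_union3 := by
  intro xs ys _
  show union3 xs ys = union3_alt xs ys
  exact union3_eq xs ys
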